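-- pv_equiv track=rewrite | github.com/posl/comment_recommendation | script/split_gen/3_time/en/267_B/5.py | isSplit
-- ===== SOURCE A (Python) =====
-- def isSplit(S):
--     if S[0] == '0':
--         return 'No'
--     else:
--         for i in range(1, 10):
--             if S[i] == '1' and S[i-1] == '0':
--                 for j in range(i+1, 10):
--                     if S[j] == '1' and S[j-1] == '0':
--                         for k in range(i, j):
--                             if S[k] == '0':
--                                 return 'Yes'
--         return 'No'
-- ===== SOURCE B (Python) =====
-- def isSplit(S):
--     if S[0] == '0':
--         return 'No'
--     cnt = 0
--     for i in range(1, 10):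
--         if S[i] == '1' and S[i-1] == '0':
--             cnt += 1
--             if cnt == 2:
--                 return 'Yes'
--     return 'No'
-- ===== Notes on version B (the rewrite author's own statement) =====
-- stated objective: simpler
-- what changed: Replaced the three nested scans (first transition, second transition, zero-in-between search) by a single left-to-right pass that counts '01' transitions and returns 'Yes' at the second one; the inner zero search is redundant because S[j-1]=='0' at any transition.
import Mathlib
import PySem

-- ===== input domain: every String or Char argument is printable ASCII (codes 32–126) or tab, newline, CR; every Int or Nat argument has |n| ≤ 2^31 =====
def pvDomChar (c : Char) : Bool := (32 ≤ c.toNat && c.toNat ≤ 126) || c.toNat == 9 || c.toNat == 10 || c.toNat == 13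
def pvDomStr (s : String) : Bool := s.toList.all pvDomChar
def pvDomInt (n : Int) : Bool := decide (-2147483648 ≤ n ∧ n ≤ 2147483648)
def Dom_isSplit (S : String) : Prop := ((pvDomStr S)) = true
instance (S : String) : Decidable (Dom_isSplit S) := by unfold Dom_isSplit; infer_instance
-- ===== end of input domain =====

-- B replaces A's three nested scans by one pass counting '01' transitions ('Yes' at the second); simpler, same result.

-- ===== PORT A =====
-- inner k-loop: 'for k in range(k, j): if S[k] == '0': return 'Yes''
-- Option layers: none = IndexError; some none = loop fell through; some (some s) = return s
def aK (cs : List Char) (k j : Nat) : Option (Option String) :=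
  if k < j then
    match PySem.List.pyGet? cs (k : Int) with
    | none => none
    | some c => if c = '0' then some (some "Yes") else aK cs (k + 1) j
  else some none
termination_by j - k

-- middle j-loop: 'for j in range(j, 10): if S[j]=='1' and S[j-1]=='0': <k-loop>'
def aJ (cs : List Char) (i j : Nat) : Option (Option String) :=
  if j < 10 then
    match PySem.List.pyGet? cs (j : Int) with
    | none => none
    | some c =>
      if c = '1' then
        match PySem.List.pyGet? cs ((j : Int) - 1) with
        | none => none
        | some d =>
          if d = '0' then
            match aK cs i j with
            | none => none
            | some (some s) => some (some s)
            | some none => aJ cs i (j + 1)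
          else aJ cs i (j + 1)
      else aJ cs i (j + 1)
  else some none
termination_by 10 - j

-- outer i-loop: 'for i in range(i, 10): if S[i]=='1' and S[i-1]=='0': <j-loop>'
def aI (cs : List Char) (i : Nat) : Option (Option String) :=
  if i < 10 then
    match PySem.List.pyGet? cs (i : Int) with
    | none => none
    | some c =>
      if c = '1' then
        match PySem.List.pyGet? cs ((i : Int) - 1) with
        | none => none
        | some d =>
          if d = '0' then
            match aJ cs i (i + 1) with
            | none => none
            | some (some s) => some (some s)
            | some none => aI cs (i + 1)
          else aI cs (i + 1)
      else aI cs (i + 1)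
  else some none
termination_by 10 - i

def isSplit (S : String) : String :=
  match PySem.List.pyGet? S.toList 0 with
  | none => ""                                  -- IndexError: excluded by Pre_
  | some c =>
    if c = '0' then "No"
    else
      match aI S.toList 1 with
      | none => ""                              -- IndexError: excluded by Pre_
      | some none => "No"
      | some (some s) => s

-- ===== PORT B =====
-- single pass: count '01' transitions at i ∈ [1,10); 'Yes' as soon as cnt hits 2
def bLoop (cs : List Char) (i cnt : Nat) : Option String :=
  if i < 10 then
    match PySem.List.pyGet? cs (i : Int) with
    | none => none
    | some c =>
      if c = '1' then
        match PySem.List.pyGet? cs ((i : Int) - 1) with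
        | none => none
        | some d =>
          if d = '0' then
            if cnt + 1 = 2 then some "Yes" else bLoop cs (i + 1) (cnt + 1)
          else bLoop cs (i + 1) cnt
      else bLoop cs (i + 1) cnt
  else some "No"
termination_by 10 - i

def isSplit_alt (S : String) : String :=
  match PySem.List.pyGet? S.toList 0 with
  | none => ""                                  -- IndexError: excluded by Pre_
  | some c =>
    if c = '0' then "No"
    else (bLoop S.toList 1 0).getD ""           -- none (IndexError) excluded by Pre_

-- ===== PRECONDITION & SPEC =====
-- Pre_ excludes exactly the inputs where the Python raises IndexError: the empty
-- string, and strings of length < 10 whose first char is not '0' and which carry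
-- fewer than two '01' transitions (so the scan runs off the end before returning).
def Pre_isSplit (S : String) : Prop :=
  S.toList ≠ [] ∧
    (S.toList.headD ' ' = '0' ∨ 10 ≤ S.toList.length ∨
      2 ≤ (List.range' 1 9).countP
            (fun j => decide (S.toList.getD j ' ' = '1' ∧ S.toList.getD (j - 1) ' ' = '0')))
instance (S : String) : Decidable (Pre_isSplit S) := by unfold Pre_isSplit; infer_instance
def pvWitness_isSplit : String := "1010101010"

def Spec_isSplit (S : String) (out : String) : Prop := out = isSplit_alt S
instance (S : String) (out : String) : Decidable (Spec_isSplit S out) := by unfold Spec_isSplit; infer_instance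

-- ===== CLAIM (what is proved, stated in full; the proofs are below) =====
def Claim_equal_isSplit : Prop := ∀ (S : String), Dom_isSplit S → Pre_isSplit S → Spec_isSplit S (isSplit S)

-- ===== LEMMAS AND PROOFS =====

-- collapse of the three-valued A result to B's two-valued one
def conv : Option (Option String) → Option String
  | none => none
  | some none => some "No"
  | some (some s) => some s

-- the transition condition at index j (j ≥ 1)
def trCond (cs : List Char) (j : Nat) : Prop :=
  PySem.List.pyGet? cs (j : Int) = some '1' ∧ PySem.List.pyGet? cs ((j : Int) - 1) = some '0'

-- The k-loop always finds the zero at j-1 when called below a transition.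
theorem aK_yes (cs : List Char) (j : Nat) :
    ∀ k, k < j → PySem.List.pyGet? cs ((j : Int) - 1) = some '0' →
      aK cs k j = some (some "Yes") := by
  intro k hk h0
  have hcast : ((j : Int) - 1) = ((j - 1 : Nat) : Int) := by omega
  rw [hcast, PySem.List.pyGet?_natCast] at h0
  obtain ⟨hlen, hj0⟩ := List.getElem?_eq_some_iff.mp h0
  have H : ∀ n k, j - k ≤ n → k < j → aK cs k j = some (some "Yes") := by
    intro n
    induction n with
    | zero => intro k hn hk; omega
    | succ n ih =>
      intro k hn hk
      rw [aK]
      have hkl : k < cs.length := by omega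
      simp only [hk, if_true, PySem.List.pyGet?_natCast, List.getElem?_eq_getElem hkl]
      by_cases hc : cs[k] = '0'
      · simp [hc]
      · have hk1 : k + 1 < j := by
          rcases Nat.lt_or_ge (k + 1) j with h | h
          · exact h
          · exfalso; have : k = j - 1 := by omega
            subst this; exact hc hj0
        simp only [hc, if_false]
        exact ih (k + 1) (by omega) hk1
  exact H (j - k) k le_rfl hk

theorem noTrans_aI (cs : List Char) (h10 : 10 ≤ cs.length) :
    ∀ i, 1 ≤ i → (∀ t, i ≤ t → t < 10 → ¬ trCond cs t) → aI cs i = some none := by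
  have H : ∀ n i, 10 - i ≤ n → 1 ≤ i → (∀ t, i ≤ t → t < 10 → ¬ trCond cs t) →
      aI cs i = some none := by
    intro n
    induction n with
    | zero =>
      intro i hn _ _
      rw [aI]; simp only [show ¬ i < 10 by omega, if_false]
    | succ n ih =>
      intro i hn hi1 hno
      by_cases hi : i < 10
      · rw [aI]
        have hil : i < cs.length := by omega
        have hil1 : i - 1 < cs.length := by omega
        have hcast : ((i : Int) - 1) = ((i - 1 : Nat) : Int) := by omega
        simp only [hi, if_true, PySem.List.pyGet?_natCast, hcast,
          List.getElem?_eq_getElem hil, List.getElem?_eq_getElem hil1]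
        by_cases hc : cs[i] = '1'
        · by_cases hd : cs[i - 1] = '0'
          · exfalso
            apply hno i le_rfl hi
            constructor
            · rw [PySem.List.pyGet?_natCast, List.getElem?_eq_getElem hil, hc]
            · rw [hcast, PySem.List.pyGet?_natCast, List.getElem?_eq_getElem hil1, hd]
          · simp only [hc, hd, if_true, if_false]
            exact ih (i + 1) (by omega) (by omega) (fun t ht h10' => hno t (by omega) h10')
        · simp only [hc, if_false]
          exact ih (i + 1) (by omega) (by omega) (fun t ht h10' => hno t (by omega) h10')
      · rw [aI]; simp only [hi, if_false]
  exact fun i => H (10 - i) i le_rfl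

-- after the first transition at i, A's j-loop (+ outer continuation) = B at cnt = 1
theorem phase1 (cs : List Char) (i : Nat) (hi1 : 1 ≤ i) :
    ∀ j, i < j → j ≤ 10 → j ≤ cs.length → (∀ t, i < t → t < j → ¬ trCond cs t) →
    conv (match aJ cs i j with
          | none => none
          | some (some s) => some (some s)
          | some none => aI cs (i + 1)) = bLoop cs j 1 := by
  have H : ∀ n j, 10 - j ≤ n → i < j → j ≤ 10 → j ≤ cs.length →
      (∀ t, i < t → t < j → ¬ trCond cs t) →
      conv (match aJ cs i j with
            | none => none
            | some (some s) => some (some s)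
            | some none => aI cs (i + 1)) = bLoop cs j 1 := by
    intro n
    induction n with
    | zero =>
      intro j hn hij hj10 hjlen hno
      have hj : j = 10 := by omega
      subst hj
      rw [aJ]; simp only [show ¬ (10 : Nat) < 10 by omega, if_false]
      rw [bLoop]; simp only [show ¬ (10 : Nat) < 10 by omega, if_false]
      have := noTrans_aI cs (by omega) (i + 1) (by omega)
        (fun t ht h10 => hno t (by omega) (by omega))
      rw [this]; rfl
    | succ n ih =>
      intro j hn hij hj10 hjlen hno
      by_cases hj : j < 10
      · rw [aJ, bLoop]
        by_cases hjl : j < cs.length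
        · have hjl1 : j - 1 < cs.length := by omega
          have hcast : ((j : Int) - 1) = ((j - 1 : Nat) : Int) := by omega
          simp only [hj, if_true, PySem.List.pyGet?_natCast, hcast,
            List.getElem?_eq_getElem hjl, List.getElem?_eq_getElem hjl1]
          by_cases hc : cs[j] = '1'
          · by_cases hd : cs[j - 1] = '0'
            · simp only [hc, hd, if_true]
              have hyes : aK cs i j = some (some "Yes") := by
                apply aK_yes cs j i hij
                rw [hcast, PySem.List.pyGet?_natCast, List.getElem?_eq_getElem hjl1, hd]
              rw [hyes]; rfl
            · simp only [hc, hd, if_true, if_false]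
              apply ih (j + 1) (by omega) (by omega) (by omega) (by omega)
              intro t ht htj
              rcases Nat.lt_or_ge t j with h | h
              · exact hno t ht h
              · have : t = j := by omega
                subst this
                intro ⟨h1, h2⟩
                rw [hcast, PySem.List.pyGet?_natCast, List.getElem?_eq_getElem hjl1] at h2
                exact hd (by injection h2)
          · simp only [hc, if_false]
            apply ih (j + 1) (by omega) (by omega) (by omega) (by omega)
            intro t ht htj
            rcases Nat.lt_or_ge t j with h | h
            · exact hno t ht h
            · have : t = j := by omega
              subst this
              intro ⟨h1, h2⟩
              rw [PySem.List.pyGet?_natCast, List.getElem?_eq_getElem hjl] at h1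
              exact hc (by injection h1)
        · have : j = cs.length := by omega
          have hnone : PySem.List.pyGet? cs (j : Int) = none := by
            rw [PySem.List.pyGet?_natCast, List.getElem?_eq_none_iff]; omega
          simp only [hj, if_true, hnone]
          rfl
      · have hj' : j = 10 := by omega
        subst hj'
        rw [aJ]; simp only [show ¬ (10 : Nat) < 10 by omega, if_false]
        rw [bLoop]; simp only [show ¬ (10 : Nat) < 10 by omega, if_false]
        have := noTrans_aI cs (by omega) (i + 1) (by omega)
          (fun t ht h10 => hno t (by omega) (by omega))
        rw [this]; rfl
  exact fun j => H (10 - j) j le_rfl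

theorem main_loop (cs : List Char) :
    ∀ i, 1 ≤ i → conv (aI cs i) = bLoop cs i 0 := by
  have H : ∀ n i, 10 - i ≤ n → 1 ≤ i → conv (aI cs i) = bLoop cs i 0 := by
    intro n
    induction n with
    | zero =>
      intro i hn _
      rw [aI, bLoop]; simp only [show ¬ i < 10 by omega, if_false]; rfl
    | succ n ih =>
      intro i hn hi1
      by_cases hi : i < 10
      · rw [aI, bLoop]
        simp only [hi, if_true]
        cases hg : PySem.List.pyGet? cs (i : Int) with
        | none => rfl
        | some c =>
          have hil : i < cs.length := by
            rw [PySem.List.pyGet?_natCast] at hg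
            exact (List.getElem?_eq_some_iff.mp hg).1
          have hil1 : i - 1 < cs.length := by omega
          have hcast : ((i : Int) - 1) = ((i - 1 : Nat) : Int) := by omega
          by_cases hc : c = '1'
          · simp only [hc, if_true, hcast, PySem.List.pyGet?_natCast,
              List.getElem?_eq_getElem hil1]
            by_cases hd : cs[i - 1] = '0'
            · simp only [hd, if_true]
              exact phase1 cs i hi1 (i + 1) (by omega) (by omega) (by omega)
                (fun t ht htj => by omega)
            · simp only [hd, if_false]
              exact ih (i + 1) (by omega) (by omega)
          · simp only [hc, if_false]
            exact ih (i + 1) (by omega) (by omega)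
      · rw [aI, bLoop]; simp only [hi, if_false]; rfl
  exact fun i => H (10 - i) i le_rfl

theorem ports_agree (S : String) : isSplit S = isSplit_alt S := by
  unfold isSplit isSplit_alt
  cases hg : PySem.List.pyGet? S.toList 0 with
  | none => rfl
  | some c =>
    by_cases hc : c = '0'
    · simp [hc]
    · simp only [hc, if_false]
      have h := main_loop S.toList 1 le_rfl
      cases ha : aI S.toList 1 with
      | none => rw [ha] at h; rw [← h]; rfl
      | some o =>
        cases o with
        | none => rw [ha] at h; rw [← h]; rfl
        | some s => rw [ha] at h; rw [← h]; rfl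

-- ===== VERDICT (by name: the statement is the Claim_ definition above) =====
theorem isSplit_spec : Claim_equal_isSplit := by
  intro S _ _
  unfold Spec_isSplit
  exact ports_agree S
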